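-- pv_equiv track=rewrite | github.com/obukhalov/hacker_rank | Manasa_and_Stones.py | stones
-- ===== SOURCE A (Python) =====
-- def stones(n, a, b):
--     _last_stone_num = set()
--     _count_a = n - 1
--     _count_b = 0
--     for i in range(n):
--         _stone_num = _count_a * a + _count_b * b
--         _last_stone_num.add(_stone_num)
--         _count_a -= 1
--         _count_b += 1
--
--     return sorted(_last_stone_num)
-- ===== SOURCE B (Python) =====
-- def stones(n, a, b):
--     # Emit the sorted distinct last-stone values directly: they form an
--     # arithmetic progression, so no set and no sort are needed.
--     if n <= 0:
--         return []
--     if a == b: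
--         return [(n - 1) * a]
--     lo = a if a < b else b
--     step = (b - a) if a < b else (a - b)
--     return [(n - 1) * lo + i * step for i in range(n)]
-- ===== Notes on version B (the rewrite author's own statement) =====
-- stated objective: faster
-- what changed: B replaces A's set-accumulation and sort by emitting the arithmetic progression of distinct last-stone values directly in sorted order (closed form, no set, no sort).
import Mathlib
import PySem

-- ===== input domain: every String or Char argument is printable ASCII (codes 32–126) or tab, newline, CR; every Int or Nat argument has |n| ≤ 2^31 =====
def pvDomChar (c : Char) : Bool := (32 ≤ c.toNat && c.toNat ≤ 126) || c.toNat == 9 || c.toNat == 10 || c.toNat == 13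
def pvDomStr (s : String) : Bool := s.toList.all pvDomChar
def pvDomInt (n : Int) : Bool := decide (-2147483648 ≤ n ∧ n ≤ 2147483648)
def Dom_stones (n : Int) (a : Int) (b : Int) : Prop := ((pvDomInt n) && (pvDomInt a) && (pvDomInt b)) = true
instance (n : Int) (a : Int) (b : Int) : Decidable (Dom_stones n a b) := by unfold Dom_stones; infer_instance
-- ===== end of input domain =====

-- B emits the sorted distinct last-stone values directly (arithmetic progression); A builds a set and sorts it.

-- ===== PORT A =====
def stones (n : Int) (a : Int) (b : Int) : List Int :=
  let st := (PySem.List.pyRange 0 n 1).foldl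
    (fun (st : PySem.Set Int × Int × Int) _ =>
      (PySem.Set.add st.1 (st.2.1 * a + st.2.2 * b), st.2.1 - 1, st.2.2 + 1))
    (PySem.Set.empty, n - 1, 0)
  PySem.List.sorted st.1 (fun x => x) false

-- ===== PORT B =====
def stones_alt (n : Int) (a : Int) (b : Int) : List Int :=
  if n ≤ 0 then []
  else if a = b then [(n - 1) * a]
  else
    let lo := if a < b then a else b
    let step := if a < b then b - a else a - b
    (PySem.List.pyRange 0 n 1).map (fun i => (n - 1) * lo + i * step)

-- ===== PRECONDITION & SPEC =====
def Spec_stones (n : Int) (a : Int) (b : Int) (out : List Int) : Prop := out = stones_alt n a b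
instance (n : Int) (a : Int) (b : Int) (out : List Int) : Decidable (Spec_stones n a b out) := by unfold Spec_stones; infer_instance

-- ===== CLAIM (what is proved, stated in full; the proofs are below) =====
def Claim_equal_stones : Prop := ∀ (n : Int) (a : Int) (b : Int), Dom_stones n a b → Spec_stones n a b (stones n a b)

-- ===== LEMMAS AND PROOFS =====

-- A's loop: the set accumulated is Set.ofList of the value sequence.
theorem stones_foldA (a b : Int) (l : List Int) (s : PySem.Set Int) (ca cb : Int) :
    (l.foldl
      (fun (st : PySem.Set Int × Int × Int) _ =>
        (PySem.Set.add st.1 (st.2.1 * a + st.2.2 * b), st.2.1 - 1, st.2.2 + 1))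
      (s, ca, cb)).1
    = ((List.range l.length).map (fun j : Nat => (ca - j) * a + (cb + j) * b)).foldl PySem.Set.add s := by
  induction l generalizing s ca cb with
  | nil => simp
  | cons x t ih =>
    simp only [List.foldl_cons, List.length_cons, List.range_succ_eq_map, List.map_cons,
      List.map_map]
    rw [ih]
    simp only [Nat.cast_zero, Int.sub_zero, Int.add_zero]
    congr 1
    apply List.map_congr_left
    intro j _
    simp only [Function.comp_apply]
    push_cast
    ring_nf

theorem stones_singleton_set (x : Int) (k : Nat) :
    PySem.Set.ofList (List.replicate (k + 1) x) = [x] := by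
  induction k with
  | zero => rfl
  | succ k ih =>
    rw [show List.replicate (k + 1 + 1) x = List.replicate (k + 1) x ++ [x] from
      List.replicate_succ' .., PySem.Set.ofList_append_singleton, ih,
      PySem.Set.add_of_mem (by simp)]

-- ===== VERDICT (by name: the statement is the Claim_ definition above) =====
theorem stones_spec : Claim_equal_stones := by
  intro n a b _
  unfold Spec_stones
  show stones n a b = stones_alt n a b
  simp only [stones, PySem.Set.empty]
  rw [stones_foldA, ← PySem.Set.ofList_eq_foldl, PySem.List.length_pyRange_one]
  by_cases hn : n ≤ 0
  · have h0 : (n - 0).toNat = 0 := by omega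
    rw [h0]
    simp [stones_alt, hn, PySem.List.sorted]
  · rw [not_le] at hn
    have hne : ¬ n ≤ 0 := hn.not_ge
    generalize hgen : (n - 0).toNat = m
    have hm : (m : Int) = n := by omega
    have hm0 : 0 < m := by omega
    set v : Nat → Int := fun j : Nat => (n - 1 - (j : Int)) * a + (0 + (j : Int)) * b with hv
    by_cases hab : a = b
    · subst hab
      have hconst : (List.range m).map v = List.replicate m ((n - 1) * a) := by
        rw [List.eq_replicate_iff]
        refine ⟨by simp, ?_⟩
        intro x hx
        obtain ⟨j, _, rfl⟩ := List.mem_map.mp hx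
        simp only [hv]; ring
      obtain ⟨k, rfl⟩ : ∃ k, m = k + 1 := ⟨m - 1, by omega⟩
      rw [hconst, stones_singleton_set]
      rw [PySem.List.sorted_eq_self_of_pairwise _ _ (by simp)]
      simp [stones_alt, hne]
    · set lo := if a < b then a else b with hlo
      set step := if a < b then b - a else a - b with hstep
      have hsp : 0 < step := by
        rcases lt_or_gt_of_ne hab with h | h <;> simp [hstep, h, not_lt.mpr h.le]
      set tgt : List Int := (PySem.List.pyRange 0 n 1).map (fun i => (n - 1) * lo + i * step)
        with htgt
      have halt : stones_alt n a b = tgt := by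
        simp only [stones_alt, if_neg hne, if_neg hab, htgt, hlo, hstep]
      have htgt' : tgt = (List.range m).map (fun k : Nat => (n - 1) * lo + (k : Int) * step) := by
        rw [htgt, PySem.List.pyRange_one, List.map_map,
          show (n - 0).toNat = m from hgen]
        apply List.map_congr_left
        intro j _
        simp
      have hpw : tgt.Pairwise (· < ·) := by
        rw [htgt', List.pairwise_map]
        refine List.pairwise_lt_range.imp_of_mem ?_
        intro i j _ _ hij
        have hij' : (i : Int) * step < (j : Int) * step :=
          mul_lt_mul_of_pos_right (by exact_mod_cast hij) hsp
        omega
      have hvals : ∀ j : Nat, v j = (n - 1) * a + (j : Int) * (b - a) := by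
        intro j; simp only [hv]; ring
      have hperm : tgt.Perm ((List.range m).map v) := by
        by_cases hlt : a < b
        · apply List.Perm.of_eq
          rw [htgt']
          apply List.map_congr_left
          intro j _
          rw [hvals]
          simp only [hlo, hstep, if_pos hlt]
        · have heq : tgt = ((List.range m).map v).reverse := by
            rw [htgt']
            apply List.ext_getElem
            · simp
            · intro i h1 h2
              simp only [List.length_map, List.length_range] at h1
              rw [List.getElem_map, List.getElem_reverse, List.getElem_map,
                List.getElem_range, List.getElem_range, hvals]
              simp only [List.length_map, List.length_range]
              simp only [hlo, hstep, if_neg hlt]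
              have hcast : ((m - 1 - i : Nat) : Int) = (m : Int) - 1 - (i : Int) := by omega
              rw [hcast, hm]
              ring
          rw [heq]
          exact (List.reverse_perm _)
      have hndt : tgt.Nodup := hpw.imp (fun h => ne_of_lt h)
      have hnd : ((List.range m).map v).Nodup := hperm.nodup_iff.mp hndt
      rw [PySem.Set.ofList_eq_self_of_nodup _ hnd,
        PySem.List.sorted_eq_of_perm_of_pairwise_lt _ _ _ hperm hpw, halt]
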